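-- pv_equiv track=rewrite | github.com/dice7077/signate_comp_2nd | scripts/tune_lightgbm_optuna.py | _resolve_max_depth
-- ===== SOURCE A (Python) =====
-- def _resolve_max_depth(value: int) -> int:
--     allowed = [-1, 6, 8, 10, 12, 14, 16]
--     if value in allowed:
--         return value
--     positive = [depth for depth in allowed if depth >= 0]
--     if not positive:
--         return -1
--     closest = min(positive, key=lambda depth: abs(depth - value))
--     return closest
-- ===== SOURCE B (Python) =====
-- def _resolve_max_depth(value: int) -> int:
--     # allowed non-negative depths are exactly the even integers 6..16;
--     # -1 passes through, everything else clamps into [6,16] and rounds down to even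
--     if value == -1:
--         return value
--     clamped = min(16, max(6, value))
--     return clamped - clamped % 2
-- ===== Notes on version B (the rewrite author's own statement) =====
-- stated objective: simpler
-- what changed: Replaced the membership test plus linear min-by-distance scan over the allowed list with a closed-form clamp into [6,16] and round-down-to-even, with -1 passed through.
import Mathlib
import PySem

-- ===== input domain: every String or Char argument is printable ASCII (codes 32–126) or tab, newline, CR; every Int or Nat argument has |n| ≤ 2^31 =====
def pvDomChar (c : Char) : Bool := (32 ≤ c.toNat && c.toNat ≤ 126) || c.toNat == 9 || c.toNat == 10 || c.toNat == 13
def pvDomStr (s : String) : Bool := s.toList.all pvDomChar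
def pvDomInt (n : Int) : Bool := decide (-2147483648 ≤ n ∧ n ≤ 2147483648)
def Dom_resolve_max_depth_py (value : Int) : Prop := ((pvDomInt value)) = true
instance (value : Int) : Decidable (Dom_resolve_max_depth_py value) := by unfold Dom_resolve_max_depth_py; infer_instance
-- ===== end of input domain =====

-- ===== PORT A =====
-- literal transliteration of A: allowed list, membership test, filter, min by |d - value| (first minimal)
def resolve_max_depth_py (value : Int) : Int :=
  let allowed : List Int := [-1, 6, 8, 10, 12, 14, 16]
  if value ∈ allowed then value
  else
    let positive := allowed.filter (fun depth => depth ≥ 0)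
    if positive = [] then -1
    else (PySem.List.min? positive (fun depth => |depth - value|)).getD (-1)

-- ===== PORT B =====
-- B: -1 passes through; otherwise clamp into [6,16] and round down to even (closed form)
def resolve_max_depth_py_alt (value : Int) : Int :=
  if value = -1 then value
  else
    let clamped := min 16 (max 6 value)
    clamped - PySem.Int.mod clamped 2

-- ===== PRECONDITION & SPEC =====
def Spec_resolve_max_depth_py (value : Int) (out : Int) : Prop := out = resolve_max_depth_py_alt value
instance (value : Int) (out : Int) : Decidable (Spec_resolve_max_depth_py value out) := by unfold Spec_resolve_max_depth_py; infer_instance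

-- ===== CLAIM (what is proved, stated in full; the proofs are below) =====
def Claim_equal_resolve_max_depth_py : Prop := ∀ (value : Int), Dom_resolve_max_depth_py value → Spec_resolve_max_depth_py value (resolve_max_depth_py value)

-- ===== LEMMAS AND PROOFS =====

-- ===== VERDICT (by name: the statement is the Claim_ definition above) =====
theorem resolve_max_depth_py_spec : Claim_equal_resolve_max_depth_py := by
  intro value _
  unfold Spec_resolve_max_depth_py resolve_max_depth_py resolve_max_depth_py_alt
  simp only [List.mem_cons, List.not_mem_nil, or_false, List.filter, PySem.List.min?]
  norm_num
  simp only [← apply_ite (f := (some : Int → Option Int)), Option.getD_some]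
  split_ifs <;> simp only [Int.abs_eq_natAbs] at * <;> omega
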